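-- pv_equiv track=rewrite | github.com/el2433jo/ellen-master-thesis | postprocessing/pdb/rigidity_filter.py | compute_max_internal_unstructured_run
-- ===== SOURCE A (Python) =====
-- from typing import Optional, Tuple, Dict, List
--
-- STRUCTURED_STATES = {"H", "G", "I", "E", "B"}
--
-- def compute_max_internal_unstructured_run(ss_codes: List[str]) -> int:
--     """
--     Unstructured = DSSP code NOT in STRUCTURED_STATES.
--     We ignore terminal runs (any run touching first or last residue).
--     """
--     n = len(ss_codes)
--     if n == 0:
--         return 0
--
--     is_unstruct = [c not in STRUCTURED_STATES for c in ss_codes]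
--
--     max_run = 0
--     i = 0
--     while i < n:
--         if not is_unstruct[i]:
--             i += 1
--             continue
--         j = i
--         while j < n and is_unstruct[j]:
--             j += 1
--
--         touches_left = (i == 0)
--         touches_right = (j == n)
--         if not touches_left and not touches_right:
--             max_run = max(max_run, j - i)
--
--         i = j
--
--     return max_run
-- ===== SOURCE B (Python) =====
-- STRUCTURED_STATES = {"H", "G", "I", "E", "B"}
--
-- def compute_max_internal_unstructured_run(ss_codes):
--     """Boundary-index formulation: an internal unstructured run is exactly the
--     gap between two consecutive structured residues, so take the max such gap."""
--     pos = [i for i, c in enumerate(ss_codes) if c in STRUCTURED_STATES]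
--     best = 0
--     for a, b in zip(pos, pos[1:]):
--         best = max(best, b - a - 1)
--     return best
-- ===== Notes on version B (the rewrite author's own statement) =====
-- stated objective: simpler
-- what changed: Replaces the two-pointer while-loop run scan by collecting the indices of structured residues and taking the maximum gap (b - a - 1) between consecutive structured indices, which is exactly the length of each internal unstructured run.
import Mathlib
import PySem

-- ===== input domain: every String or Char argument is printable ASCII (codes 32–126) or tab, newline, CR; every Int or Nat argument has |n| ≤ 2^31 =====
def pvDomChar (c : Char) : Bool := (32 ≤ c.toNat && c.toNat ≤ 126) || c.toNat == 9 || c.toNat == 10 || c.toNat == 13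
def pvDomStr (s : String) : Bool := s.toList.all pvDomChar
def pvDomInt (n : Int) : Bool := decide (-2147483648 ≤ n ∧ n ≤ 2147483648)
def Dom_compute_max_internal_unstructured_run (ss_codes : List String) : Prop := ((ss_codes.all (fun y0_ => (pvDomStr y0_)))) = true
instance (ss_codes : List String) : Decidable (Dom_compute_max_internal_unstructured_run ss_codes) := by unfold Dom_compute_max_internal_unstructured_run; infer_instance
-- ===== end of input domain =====

-- B replaces A's two-pointer run scan by a max over gaps between consecutive structured indices (simpler; same O(n) cost).

-- ===== PORT A =====
-- module constant STRUCTURED_STATES (a Python set), shared by both ports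
def pvStructured : PySem.Set String := PySem.Set.ofList ["H", "G", "I", "E", "B"]

-- inner while: 'while j < n and is_unstruct[j]: j += 1'
def pvScan (u : List Bool) (n : Nat) (j : Nat) : Nat :=
  if j < n ∧ u.getD j false then pvScan u n (j + 1) else j
termination_by n - j
decreasing_by omega

theorem pvScan_ge (u : List Bool) (n j : Nat) : j ≤ pvScan u n j := by
  fun_induction pvScan u n j with
  | case1 j h ih => omega
  | case2 j h => omega

theorem pvScan_gt (u : List Bool) (n j : Nat) (h1 : j < n) (h2 : u.getD j false = true) :
    j < pvScan u n j := by
  rw [pvScan]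
  rw [if_pos ⟨h1, h2⟩]
  have := pvScan_ge u n (j + 1)
  omega

-- outer while loop of A, state (max_run, i)
def pvLoopA (u : List Bool) (n : Nat) (max_run : Int) (i : Nat) : Int :=
  if h : i < n then
    if hu : u.getD i false = false then pvLoopA u n max_run (i + 1)
    else
      let j := pvScan u n i
      let max_run' := if ¬ (i = 0) ∧ ¬ (j = n) then max max_run ((j : Int) - (i : Int)) else max_run
      pvLoopA u n max_run' j
  else max_run
termination_by n - i
decreasing_by
  · omega
  · have h1 : i < pvScan u n i := pvScan_gt u n i h (by revert hu; cases u.getD i false <;> simp)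
    omega

def compute_max_internal_unstructured_run (ss_codes : List String) : Int :=
  let n := ss_codes.length
  if n = 0 then 0
  else
    let is_unstruct := ss_codes.map (fun c => !(PySem.Set.contains pvStructured c))
    pvLoopA is_unstruct n 0 0

-- ===== PORT B =====
def compute_max_internal_unstructured_run_alt (ss_codes : List String) : Int :=
  let pos := ((PySem.List.enumerate ss_codes).filter
      (fun p => PySem.Set.contains pvStructured p.2)).map Prod.fst
  (pos.zip pos.tail).foldl (fun best p => max best (p.2 - p.1 - 1)) 0

-- ===== PRECONDITION & SPEC =====
def Spec_compute_max_internal_unstructured_run (ss_codes : List String) (out : Int) : Prop := out = compute_max_internal_unstructured_run_alt ss_codes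
instance (ss_codes : List String) (out : Int) : Decidable (Spec_compute_max_internal_unstructured_run ss_codes out) := by unfold Spec_compute_max_internal_unstructured_run; infer_instance

-- ===== CLAIM (what is proved, stated in full; the proofs are below) =====
def Claim_equal_compute_max_internal_unstructured_run : Prop := ∀ (ss_codes : List String), Dom_compute_max_internal_unstructured_run ss_codes → Spec_compute_max_internal_unstructured_run ss_codes (compute_max_internal_unstructured_run ss_codes)

-- ===== LEMMAS AND PROOFS =====

theorem pvScan_le (u : List Bool) (n j : Nat) : j ≤ n → pvScan u n j ≤ n := by
  fun_induction pvScan u n j with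
  | case1 j h ih => intro _; exact ih (by omega)
  | case2 j _h => intro h'; omega

-- common reference semantics: a one-pass state machine over the is_unstruct mask.
-- state: none = no structured residue seen yet; some c = c unstructured since the last structured one.
def pvStM : List Bool → Option Int → Int → Int
  | [], _, best => best
  | true :: rest, none, best => pvStM rest none best
  | true :: rest, some c, best => pvStM rest (some (c + 1)) best
  | false :: rest, none, best => pvStM rest (some 0) best
  | false :: rest, some c, best => pvStM rest (some 0) (max best c)

theorem pvStM_skip_none (k : Nat) (l : List Bool) (m : Int) :
    pvStM (List.replicate k true ++ l) none m = pvStM l none m := by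
  induction k with
  | zero => rfl
  | succ k ih => simpa [List.replicate_succ, pvStM] using ih

theorem pvStM_skip_some (k : Nat) (l : List Bool) (c m : Int) :
    pvStM (List.replicate k true ++ l) (some c) m = pvStM l (some (c + k)) m := by
  induction k generalizing c with
  | zero => simp
  | succ k ih =>
      rw [List.replicate_succ, List.cons_append]
      show pvStM (List.replicate k true ++ l) (some (c + 1)) m = _
      rw [ih]
      congr 2
      push_cast
      ring

theorem pvScan_stop (u : List Bool) (n j : Nat) :
    ¬ (pvScan u n j < n ∧ u.getD (pvScan u n j) false = true) := by
  fun_induction pvScan u n j with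
  | case1 j h ih => exact ih
  | case2 j h => exact h

theorem getD_eq_getElem (u : List Bool) (j : Nat) (h : j < u.length) :
    u.getD j false = u[j] := by
  simp [List.getD_eq_getElem?_getD, List.getElem?_eq_getElem h]

theorem pvScan_eq (u : List Bool) (j : Nat) :
    j ≤ u.length → pvScan u u.length j = j + ((u.drop j).takeWhile id).length := by
  fun_induction pvScan u u.length j with
  | case1 j h ih =>
      intro hle
      obtain ⟨hlt, hget⟩ := h
      have hdrop : u.drop j = u[j] :: u.drop (j + 1) := List.drop_eq_getElem_cons hlt
      have hgj : u[j] = true := by rw [← getD_eq_getElem u j hlt]; exact hget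
      rw [ih (by omega), hdrop, hgj]
      simp [List.takeWhile]
      omega
  | case2 j h =>
      intro hle
      rcases Nat.lt_or_ge j u.length with hlt | hge
      · have hget : u.getD j false = false := by
          by_contra hc
          exact h ⟨hlt, by revert hc; cases u.getD j false <;> simp⟩
        have hdrop : u.drop j = u[j] :: u.drop (j + 1) := List.drop_eq_getElem_cons hlt
        have hgj : u[j] = false := by rw [← getD_eq_getElem u j hlt]; exact hget
        rw [hdrop, hgj]
        simp [List.takeWhile]
      · have : u.drop j = [] := List.drop_eq_nil_of_le hge
        simp [this]

-- the mask is all-true on a run: takeWhile id is a replicate of trues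
theorem takeWhile_id_replicate (l : List Bool) :
    l.takeWhile id = List.replicate (l.takeWhile id).length true := by
  apply List.eq_replicate_of_mem
  intro b hb
  have := List.mem_takeWhile_imp hb
  simpa using this

theorem drop_takeWhile_length {α : Type} (p : α → Bool) (l : List α) :
    l.drop (l.takeWhile p).length = l.dropWhile p := by
  induction l with
  | nil => rfl
  | cons a t ih =>
      by_cases h : p a = true
      · simp [h, ih]
      · have h' : p a = false := by revert h; cases p a <;> simp
        simp [h']

theorem loopA_eq (fuel : Nat) : ∀ (u : List Bool) (n : Nat) (m : Int) (i : Nat),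
    n - i ≤ fuel → n = u.length → i ≤ n → 0 ≤ m →
    pvLoopA u n m i = if i = 0 then pvStM u none m else pvStM (u.drop i) (some 0) m := by
  induction fuel with
  | zero =>
      intro u n m i hf hn hi hm
      conv_lhs => rw [pvLoopA]
      rw [dif_neg (by omega)]
      rcases Nat.eq_zero_or_pos i with h0 | hpos
      · subst h0
        have hu0 : u = [] := List.eq_nil_of_length_eq_zero (by omega)
        rw [if_pos rfl, hu0]
        rfl
      · rw [if_neg (by omega)]
        have hdn : u.drop i = [] := List.drop_eq_nil_of_le (by omega)
        rw [hdn]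
        rfl
  | succ fuel ihf =>
      intro u n m i hf hn hi hm
      by_cases hlt : i < n
      · conv_lhs => rw [pvLoopA]
        rw [dif_pos hlt]
        by_cases hu : u.getD i false = false
        · -- u[i] structured (false): step over it
          rw [dif_pos hu]
          have hil : i < u.length := by omega
          have hdrop : u.drop i = u[i] :: u.drop (i + 1) := List.drop_eq_getElem_cons hil
          have hgi : u[i] = false := by rw [← getD_eq_getElem u i hil]; exact hu
          rw [ihf u n m (i + 1) (by omega) hn (by omega) hm]
          rw [if_neg (by omega)]
          rcases Nat.eq_zero_or_pos i with h0 | hpos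
          · subst h0
            have hud : u = false :: u.drop 1 := by simpa [hgi] using hdrop
            rw [if_pos rfl]
            conv_rhs => rw [hud]
            rfl
          · rw [if_neg (by omega)]
            conv_rhs => rw [hdrop, hgi]
            show pvStM (u.drop (i + 1)) (some 0) m = pvStM (u.drop (i + 1)) (some 0) (max m 0)
            rw [max_eq_left hm]
        · -- u[i] unstructured (true): scan the whole run
          rw [dif_neg hu]
          show pvLoopA u n
              (if ¬ (i = 0) ∧ ¬ (pvScan u n i = n) then max m ((pvScan u n i : Int) - (i : Int)) else m)
              (pvScan u n i) = _
          have hgi : u.getD i false = true := by revert hu; cases u.getD i false <;> simp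
          have hjgt : i < pvScan u n i := pvScan_gt u n i hlt hgi
          have hjle : pvScan u n i ≤ n := pvScan_le u n i (by omega)
          set j := pvScan u n i with hj
          have hm' : 0 ≤ if ¬ (i = 0) ∧ ¬ (j = n) then max m ((j : Int) - (i : Int)) else m := by
            split_ifs with hc
            · exact le_trans hm (le_max_left _ _)
            · exact hm
          rw [ihf u n _ j (by omega) hn hjle hm']
          rw [if_neg (show ¬ j = 0 by omega)]
          have htw : j = i + ((u.drop i).takeWhile id).length := by
            rw [hj, hn]; exact pvScan_eq u i (by omega)
          have hsplit : u.drop i = List.replicate (j - i) true ++ u.drop j := by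
            have h2 : u.drop j = (u.drop i).dropWhile id := by
              have h3 : (u.drop i).drop ((u.drop i).takeWhile id).length = u.drop j := by
                rw [List.drop_drop]
                congr 1
                omega
              rw [← h3, drop_takeWhile_length]
            rw [h2]
            conv_lhs => rw [← List.takeWhile_append_dropWhile (p := id) (l := u.drop i)]
            congr 1
            rw [takeWhile_id_replicate]
            congr 1
            omega
          rcases Nat.lt_or_ge j n with hjn | hjn
          · -- j < n : u[j] is structured (false)
            have hgetj : u.getD j false = false := by
              have hs := pvScan_stop u n i
              rw [← hj] at hs
              by_contra hc
              exact hs ⟨hjn, by revert hc; cases u.getD j false <;> simp⟩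
            have hjl : j < u.length := by omega
            have hdropj : u.drop j = u[j] :: u.drop (j + 1) := List.drop_eq_getElem_cons hjl
            have hgj : u[j] = false := by rw [← getD_eq_getElem u j hjl]; exact hgetj
            rcases Nat.eq_zero_or_pos i with h0 | hpos
            · -- first run touches the left end: no credit
              subst h0
              rw [if_pos rfl]
              rw [if_neg (show ¬ (¬ (0 : Nat) = 0 ∧ ¬ j = n) by simp)]
              have hu0 : u = List.replicate j true ++ u.drop j := by
                have h4 := hsplit
                simpa using h4
              conv_rhs => rw [hu0]
              rw [pvStM_skip_none]
              rw [hdropj, hgj]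
              show pvStM (u.drop (j + 1)) (some 0) (max m 0) = pvStM (u.drop (j + 1)) (some 0) m
              rw [max_eq_left hm]
            · -- internal run: credit j - i
              rw [if_neg (show ¬ i = 0 by omega)]
              rw [if_pos (show ¬ i = 0 ∧ ¬ j = n from ⟨by omega, by omega⟩)]
              conv_rhs => rw [hsplit]
              rw [pvStM_skip_some]
              rw [hdropj, hgj]
              show pvStM (u.drop (j + 1)) (some 0) (max (max m ((j : Int) - (i : Int))) 0)
                  = pvStM (u.drop (j + 1)) (some 0) (max m ((0 : Int) + ((j - i : Nat) : Int)))
              congr 1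
              rw [show ((j - i : Nat) : Int) = (j : Int) - (i : Int) from by omega]
              rw [zero_add, max_eq_left (le_trans hm (le_max_left _ _))]
          · -- run touches the right end: j = n, no credit, loop ends after
            have hjn' : j = n := by omega
            have hdn : u.drop j = [] := List.drop_eq_nil_of_le (by omega)
            rw [if_neg (show ¬ (¬ i = 0 ∧ ¬ j = n) from fun hc => hc.2 hjn')]
            rw [hdn]
            rcases Nat.eq_zero_or_pos i with h0 | hpos
            · subst h0
              rw [if_pos rfl]
              have hu0 : u = List.replicate j true := by
                have h4 := hsplit
                simpa [hdn] using h4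
              conv_rhs =>
                rw [hu0, show List.replicate j true = List.replicate j true ++ ([] : List Bool)
                  from (List.append_nil _).symm]
              rw [pvStM_skip_none]
              rfl
            · rw [if_neg (show ¬ i = 0 by omega)]
              conv_rhs => rw [hsplit, hdn]
              rw [pvStM_skip_some]
              rfl
      · conv_lhs => rw [pvLoopA]
        rw [dif_neg hlt]
        rcases Nat.eq_zero_or_pos i with h0 | hpos
        · subst h0
          have hu0 : u = [] := List.eq_nil_of_length_eq_zero (by omega)
          rw [if_pos rfl, hu0]
          rfl
        · rw [if_neg (by omega)]
          have hdn : u.drop i = [] := List.drop_eq_nil_of_le (by omega)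
          rw [hdn]
          rfl

-- B side: positions of structured residues, then max gap, equals the same state machine
def pvIdxF : List Bool → Int → List Int
  | [], _ => []
  | b :: rest, k => if b then pvIdxF rest (k + 1) else k :: pvIdxF rest (k + 1)

def pvGFold (best : Int) (l : List Int) : Int :=
  (l.zip l.tail).foldl (fun b p => max b (p.2 - p.1 - 1)) best

theorem pvGFold_cons2 (best p q : Int) (rest : List Int) :
    pvGFold best (p :: q :: rest) = pvGFold (max best (q - p - 1)) (q :: rest) := rfl

theorem pvGFold_some (u : List Bool) :
    ∀ (p j best : Int), pvGFold best (p :: pvIdxF u j) = pvStM u (some (j - p - 1)) best := by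
  induction u with
  | nil => intro p j best; rfl
  | cons b rest ih =>
      intro p j best
      cases b
      · show pvGFold best (p :: (j :: pvIdxF rest (j + 1))) = pvStM (false :: rest) (some (j - p - 1)) best
        rw [pvGFold_cons2, ih j (j + 1) (max best (j - p - 1))]
        rw [show (j + 1 - j - 1 : Int) = 0 from by ring]
        rfl
      · show pvGFold best (p :: pvIdxF rest (j + 1)) = pvStM (true :: rest) (some (j - p - 1)) best
        rw [ih p (j + 1) best]
        rw [show (j + 1 - p - 1 : Int) = j - p - 1 + 1 from by ring]
        rfl

theorem pvGFold_none (u : List Bool) :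
    ∀ (k best : Int), pvGFold best (pvIdxF u k) = pvStM u none best := by
  induction u with
  | nil => intro k best; rfl
  | cons b rest ih =>
      intro k best
      cases b
      · show pvGFold best (k :: pvIdxF rest (k + 1)) = pvStM (false :: rest) none best
        rw [pvGFold_some rest k (k + 1) best]
        rw [show (k + 1 - k - 1 : Int) = 0 from by ring]
        rfl
      · show pvGFold best (pvIdxF rest (k + 1)) = pvStM (true :: rest) none best
        exact ih (k + 1) best

theorem pos_eq (ss : List String) :
    ∀ s : Int, ((PySem.List.enumerate ss s).filter
        (fun p => PySem.Set.contains pvStructured p.2)).map Prod.fst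
      = pvIdxF (ss.map (fun c => !(PySem.Set.contains pvStructured c))) s := by
  induction ss with
  | nil => intro s; simp [PySem.List.enumerate, pvIdxF]
  | cons c rest ih =>
      intro s
      rw [PySem.List.enumerate_cons]
      by_cases h : c ∈ pvStructured
      · simp only [List.filter_cons]
        simp [pvIdxF, h]
        simpa using ih (s + 1)
      · simp only [List.filter_cons]
        simp [pvIdxF, h]
        simpa using ih (s + 1)

theorem alt_eq (ss : List String) :
    compute_max_internal_unstructured_run_alt ss
      = pvStM (ss.map (fun c => !(PySem.Set.contains pvStructured c))) none 0 := by
  unfold compute_max_internal_unstructured_run_alt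
  show pvGFold 0 (((PySem.List.enumerate ss).filter
      (fun p => PySem.Set.contains pvStructured p.2)).map Prod.fst) = _
  rw [pos_eq ss 0, pvGFold_none]

theorem a_eq (ss : List String) :
    compute_max_internal_unstructured_run ss
      = pvStM (ss.map (fun c => !(PySem.Set.contains pvStructured c))) none 0 := by
  unfold compute_max_internal_unstructured_run
  by_cases h : ss.length = 0
  · have : ss = [] := List.eq_nil_of_length_eq_zero h
    simp [this, pvStM]
  · rw [if_neg h]
    have := loopA_eq ss.length (ss.map (fun c => !(PySem.Set.contains pvStructured c)))
      ss.length 0 0 (by omega) (by simp) (by omega) (by omega)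
    rw [this]
    rfl

-- ===== VERDICT (by name: the statement is the Claim_ definition above) =====
theorem compute_max_internal_unstructured_run_spec : Claim_equal_compute_max_internal_unstructured_run := by
  intro ss _
  unfold Spec_compute_max_internal_unstructured_run
  rw [a_eq, alt_eq]
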